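-- pv_equiv track=rewrite | github.com/Korneevs/Streamlit | Lib/media/Visualizer/BeautyUnderneath_exp.py | _add_br_in_text
-- ===== SOURCE A (Python) =====
-- def _add_br_in_text(text):
--     size = 15
--     res = []
--     prev_sz = 0
--
--     for t in text.split('<br>'):
--         for i in range(0, len(t), size):
--             right = min(len(t), i + size)
--             res.append(t[i:right] + "<br>")
--     return "".join(res)
-- ===== SOURCE B (Python) =====
-- import re
--
--
-- def _add_br_in_text(text):
--     # One regex substitution per segment: greedily consume up to 15 chars
--     # and append '<br>' after each group; empty segments emit nothing.
--     return ''.join(re.sub(r'.{1,15}', r'\g<0><br>', t, flags=re.DOTALL)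
--                    for t in text.split('<br>'))
-- ===== Notes on version B (the rewrite author's own statement) =====
-- stated objective: simpler
-- what changed: The explicit index loop over range(0, len(t), 15) with min-clamped slicing is replaced by a single regex substitution per segment (re.sub(r'.{1,15}', r'\g<0><br>', t, flags=re.DOTALL)), joined by ''.join over a generator.
import Mathlib
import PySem

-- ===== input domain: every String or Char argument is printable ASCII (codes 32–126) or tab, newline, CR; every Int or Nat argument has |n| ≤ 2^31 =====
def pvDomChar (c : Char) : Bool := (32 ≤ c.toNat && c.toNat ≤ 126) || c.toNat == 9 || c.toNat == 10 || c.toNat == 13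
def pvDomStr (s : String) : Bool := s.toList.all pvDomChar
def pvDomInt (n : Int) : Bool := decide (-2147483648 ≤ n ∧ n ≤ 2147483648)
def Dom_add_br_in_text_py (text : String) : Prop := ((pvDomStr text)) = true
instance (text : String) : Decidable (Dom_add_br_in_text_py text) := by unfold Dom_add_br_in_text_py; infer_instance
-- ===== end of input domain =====

-- B replaces A's index loop over range(0, len(t), 15) by one regex substitution per
-- segment (re.sub(r'.{1,15}', r'\g<0><br>', t, flags=re.DOTALL)); objective: simpler.

-- ===== PORT A =====
def add_br_in_text_py (text : String) : String :=
  let size : Int := 15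
  let res : List (List Char) :=
    (PySem.Chars.splitOn text.toList "<br>".toList).foldl
      (fun res t =>
        (PySem.List.pyRange 0 (PySem.Chars.len t) size).foldl
          (fun res i =>
            let right : Int := min (PySem.Chars.len t) (i + size)
            res ++ [PySem.Chars.slice t (some i) (some right) ++ "<br>".toList])
          res)
      []
  String.ofList (PySem.Chars.join [] res)

-- ===== PORT B =====
-- Transcription of re.sub(r'.{1,15}', r'\g<0><br>', t, flags=re.DOTALL): the regex
-- greedily consumes up to 15 code points per match and the replacement appends '<br>'
-- after the match; this hand port is exact for that pattern on any string.
def brChunk (cs : List Char) : List Char :=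
  if cs = [] then []
  else cs.take 15 ++ "<br>".toList ++ brChunk (cs.drop 15)
termination_by cs.length
decreasing_by
  cases cs with
  | nil => simp_all
  | cons a l => simp only [List.length_drop, List.length_cons]; omega

def add_br_in_text_py_alt (text : String) : String :=
  String.ofList (PySem.Chars.join []
    ((PySem.Chars.splitOn text.toList "<br>".toList).map brChunk))

-- ===== PRECONDITION & SPEC =====
def Spec_add_br_in_text_py (text : String) (out : String) : Prop := out = add_br_in_text_py_alt text
instance (text : String) (out : String) : Decidable (Spec_add_br_in_text_py text out) := by unfold Spec_add_br_in_text_py; infer_instance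

-- ===== CLAIM (what is proved, stated in full; the proofs are below) =====
def Claim_equal_add_br_in_text_py : Prop := ∀ (text : String), Dom_add_br_in_text_py text → Spec_add_br_in_text_py text (add_br_in_text_py text)

-- ===== LEMMAS AND PROOFS =====

-- the list of chunk-pieces A's inner loop appends for one segment
def pieces (cs : List Char) : List (List Char) :=
  if cs = [] then []
  else (cs.take 15 ++ "<br>".toList) :: pieces (cs.drop 15)
termination_by cs.length
decreasing_by
  cases cs with
  | nil => simp_all
  | cons a l => simp only [List.length_drop, List.length_cons]; omega

lemma flatten_pieces (cs : List Char) : (pieces cs).flatten = brChunk cs := by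
  rw [pieces, brChunk]
  split
  · simp
  · rw [List.flatten_cons, flatten_pieces (cs.drop 15)]
termination_by cs.length
decreasing_by
  cases cs with
  | nil => simp_all
  | cons a l => simp only [List.length_drop, List.length_cons]; omega

lemma join_nil_eq_flatten (l : List (List Char)) : PySem.Chars.join [] l = l.flatten := by
  match l with
  | [] => simp [PySem.Chars.join_nil]
  | [p] => simp [PySem.Chars.join_singleton]
  | p :: q :: rest =>
    rw [PySem.Chars.join_cons_cons, join_nil_eq_flatten (q :: rest)]
    simp

lemma pyRange15_cons {n : Int} (h : 0 < n) :
    PySem.List.pyRange 0 n 15 = 0 :: (PySem.List.pyRange 0 (n - 15) 15).map (· + 15) := by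
  rw [PySem.List.pyRange_of_pos _ _ (by norm_num : (0:Int) < 15),
      PySem.List.pyRange_of_pos _ _ (by norm_num : (0:Int) < 15)]
  have hN : (if (0:Int) < n then ((n - 0 + 15 - 1) / 15).toNat else 0)
      = (if (0:Int) < n - 15 then ((n - 15 - 0 + 15 - 1) / 15).toNat else 0) + 1 := by
    split <;> split <;> omega
  rw [hN, List.range_succ_eq_map]
  simp only [List.map_cons, List.map_map, List.cons.injEq]
  refine ⟨by norm_num, ?_⟩
  apply List.map_congr_left
  intro k _
  simp only [Function.comp_apply]
  push_cast
  ring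

-- A's inner loop over one segment appends exactly `pieces t`
lemma inner_loop (fuel : Nat) (t : List Char) (hf : t.length ≤ fuel)
    (res : List (List Char)) :
    (PySem.List.pyRange 0 (PySem.Chars.len t) 15).foldl
      (fun res i =>
        let right : Int := min (PySem.Chars.len t) (i + 15)
        res ++ [PySem.Chars.slice t (some i) (some right) ++ "<br>".toList])
      res
    = res ++ pieces t := by
  induction fuel generalizing t res with
  | zero =>
    have ht : t = [] := by
      cases t with
      | nil => rfl
      | cons a l => simp at hf
    subst ht
    rw [pieces]
    simp [PySem.Chars.len, PySem.List.pyRange_of_pos _ _ (by norm_num : (0:Int) < 15)]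
  | succ m ih =>
    by_cases ht : t = []
    · subst ht
      rw [pieces]
      simp [PySem.Chars.len, PySem.List.pyRange_of_pos _ _ (by norm_num : (0:Int) < 15)]
    · have hlen : 0 < t.length := List.length_pos_iff.mpr ht
      have hn : PySem.Chars.len t = (t.length : Int) := by
        simp [PySem.Chars.len]
      rw [hn, pyRange15_cons (by exact_mod_cast hlen), List.foldl_cons, List.foldl_map]
      simp only [PySem.Chars.slice_eq_listSlice]
      have hhead : PySem.List.slice t (some 0) (some (min (t.length : Int) (0 + 15)))
          ++ "<br>".toList = t.take 15 ++ "<br>".toList := by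
        rw [PySem.List.slice_toNat t (by norm_num) (by positivity)]
        congr 1
        simp only [Int.toNat_zero, Nat.sub_zero, List.drop_zero]
        by_cases h15 : t.length ≤ 15
        · have h : (min (t.length : Int) (0 + 15)).toNat = t.length := by omega
          rw [h, List.take_length, List.take_of_length_le h15]
        · have h : (min (t.length : Int) (0 + 15)).toNat = 15 := by omega
          rw [h]
      by_cases h15 : 15 ≤ t.length
      · have hd : PySem.Chars.len (t.drop 15) = (t.length : Int) - 15 := by
          simp [PySem.Chars.len]; omega
        have htail := ih (t.drop 15) (by simp only [List.length_drop]; omega)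
          (res ++ [PySem.List.slice t (some 0) (some (min (t.length : Int) (0 + 15))) ++ "<br>".toList])
        rw [hd] at htail
        simp only [PySem.Chars.slice_eq_listSlice] at htail
        have hcongr : (PySem.List.pyRange 0 ((t.length : Int) - 15) 15).foldl
            (fun x y => x ++ [PySem.List.slice t (some (y + 15))
              (some (min ((t.length : Int)) (y + 15 + 15))) ++ "<br>".toList])
            (res ++ [PySem.List.slice t (some 0) (some (min (t.length : Int) (0 + 15))) ++ "<br>".toList])
          = (PySem.List.pyRange 0 ((t.length : Int) - 15) 15).foldl
            (fun x y => x ++ [PySem.List.slice (t.drop 15) (some y)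
              (some (min ((t.length : Int) - 15) (y + 15))) ++ "<br>".toList])
            (res ++ [PySem.List.slice t (some 0) (some (min (t.length : Int) (0 + 15))) ++ "<br>".toList]) := by
          apply PySem.List.foldl_congr_mem
          intro acc k hk
          rw [PySem.List.mem_pyRange_iff_of_pos (by norm_num)] at hk
          obtain ⟨hk0, hkb, -⟩ := hk
          congr 2
          rw [PySem.List.slice_toNat t (by omega) (by omega),
              PySem.List.slice_toNat (t.drop 15) (by omega) (by omega),
              List.drop_drop]
          have hidx : (k + 15).toNat = 15 + k.toNat := by omega
          have hcount : (min ((t.length : Int)) (k + 15 + 15)).toNat - (15 + k.toNat)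
              = (min ((t.length : Int) - 15) (k + 15)).toNat - k.toNat := by omega
          rw [hidx, hcount]
        refine Eq.trans (hcongr.trans htail) ?_
        rw [hhead]
        conv_rhs => rw [pieces]
        rw [if_neg ht]
        simp
      · have hd : t.drop 15 = [] := List.drop_eq_nil_of_le (by omega)
        have hr : PySem.List.pyRange 0 ((t.length : Int) - 15) 15 = [] := by
          rw [PySem.List.pyRange_of_pos _ _ (by norm_num : (0:Int) < 15)]
          rw [if_neg (by omega)]
          simp
        rw [hr]
        simp only [List.foldl_nil]
        rw [hhead]
        conv_rhs => rw [pieces]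
        rw [if_neg ht, hd]
        simp [pieces]

lemma flatten_flatMap_pieces (segs : List (List Char)) :
    (segs.flatMap pieces).flatten = (segs.map brChunk).flatten := by
  induction segs with
  | nil => simp
  | cons s rest ih =>
    simp only [List.flatMap_cons, List.map_cons, List.flatten_append, List.flatten_cons]
    rw [flatten_pieces, ih]

-- ===== VERDICT (by name: the statement is the Claim_ definition above) =====
theorem add_br_in_text_py_spec : Claim_equal_add_br_in_text_py := by
  intro text _
  unfold Spec_add_br_in_text_py add_br_in_text_py add_br_in_text_py_alt
  simp only []
  congr 1
  rw [join_nil_eq_flatten, join_nil_eq_flatten]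
  have hfold : (PySem.Chars.splitOn text.toList "<br>".toList).foldl
      (fun res t =>
        (PySem.List.pyRange 0 (PySem.Chars.len t) 15).foldl
          (fun res i =>
            let right : Int := min (PySem.Chars.len t) (i + 15)
            res ++ [PySem.Chars.slice t (some i) (some right) ++ "<br>".toList])
          res)
      []
      = (PySem.Chars.splitOn text.toList "<br>".toList).flatMap pieces := by
    have hbody : (fun (res : List (List Char)) (t : List Char) =>
        (PySem.List.pyRange 0 (PySem.Chars.len t) 15).foldl
          (fun res i =>
            let right : Int := min (PySem.Chars.len t) (i + 15)
            res ++ [PySem.Chars.slice t (some i) (some right) ++ "<br>".toList])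
          res)
        = (fun res t => res ++ pieces t) := by
      funext res t
      exact inner_loop t.length t le_rfl res
    rw [hbody, PySem.List.foldl_append_eq_flatMap]
    simp
  rw [hfold, flatten_flatMap_pieces]
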